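-- pv_equiv track=rewrite | github.com/chungenyu6/SCoOP | src/metric/ua_metric.py | calculate_output_tokens
-- ===== SOURCE A (Python) =====
-- def calculate_output_tokens(sample_result, log_output_tokens_list):
--     """
--     Calculate output tokens statistics from N logs.
--
--     Args:
--         sample_result (dict): Result dictionary to populate output tokens info
--         log_output_tokens_list (List[dict]): List of output tokens info dicts from all logs
--     Returns:
--         dict: Updated result dictionary with output tokens info
--     """
--
--     try:
--         num_logs = len(log_output_tokens_list)
--         init_output_tokens = [log.get('init_output_tokens', 0) for log in log_output_tokens_list]
--         total_output_tokens = [log.get('total_output_tokens', 0) for log in log_output_tokens_list]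
--
--         overall_output_tokens_fusion = sum(init_output_tokens) # N LVLMs without UQ with fusion
--         overall_output_tokens_uq_fusion = sum(total_output_tokens) # N LVLMs with UQ with fusion
--
--         sample_result['output_tokens'] = {
--             'overall_output_tokens_fusion': overall_output_tokens_fusion,
--             'overall_output_tokens_uq_fusion': overall_output_tokens_uq_fusion
--         }
--
--         # --- Add individual log tokens dynamically ---
--         for i in range(num_logs):
--             sample_result['output_tokens'][f'log{i+1}_init_output_tokens'] = init_output_tokens[i]
--             sample_result['output_tokens'][f'log{i+1}_total_output_tokens'] = total_output_tokens[i]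
--         # ------------------------------------------
--
--     except Exception as e:
--         sample_result['output_tokens'] = {
--             'error': str(e)
--         }
--
--     return sample_result
-- ===== SOURCE B (Python) =====
-- def calculate_output_tokens(sample_result, log_output_tokens_list):
--     """Build the named per-log entries first in one comprehension, then derive the
--     two overall sums FROM the built entries by key suffix, and assemble the dict once."""
--     try:
--         entries = [(f'log{i}_{kind}_output_tokens', log.get(f'{kind}_output_tokens', 0))
--                    for i, log in enumerate(log_output_tokens_list, 1)
--                    for kind in ('init', 'total')]
--         tokens = {'overall_output_tokens_fusion':
--                       sum(v for k, v in entries if k.endswith('_init_output_tokens')),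
--                   'overall_output_tokens_uq_fusion':
--                       sum(v for k, v in entries if k.endswith('_total_output_tokens'))}
--         tokens.update(entries)
--         sample_result['output_tokens'] = tokens
--     except Exception as e:
--         sample_result['output_tokens'] = {'error': str(e)}
--     return sample_result
-- ===== Notes on version B (the rewrite author's own statement) =====
-- stated objective: alternative
-- what changed: B builds the formatted per-log (key, value) entries first in a single comprehension and then derives the two overall sums from those built entries by filtering on the key suffix, instead of A's two per-field list comprehensions, two sums over the raw logs, and an indexed range-loop mutating the dict.
import Mathlib
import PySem

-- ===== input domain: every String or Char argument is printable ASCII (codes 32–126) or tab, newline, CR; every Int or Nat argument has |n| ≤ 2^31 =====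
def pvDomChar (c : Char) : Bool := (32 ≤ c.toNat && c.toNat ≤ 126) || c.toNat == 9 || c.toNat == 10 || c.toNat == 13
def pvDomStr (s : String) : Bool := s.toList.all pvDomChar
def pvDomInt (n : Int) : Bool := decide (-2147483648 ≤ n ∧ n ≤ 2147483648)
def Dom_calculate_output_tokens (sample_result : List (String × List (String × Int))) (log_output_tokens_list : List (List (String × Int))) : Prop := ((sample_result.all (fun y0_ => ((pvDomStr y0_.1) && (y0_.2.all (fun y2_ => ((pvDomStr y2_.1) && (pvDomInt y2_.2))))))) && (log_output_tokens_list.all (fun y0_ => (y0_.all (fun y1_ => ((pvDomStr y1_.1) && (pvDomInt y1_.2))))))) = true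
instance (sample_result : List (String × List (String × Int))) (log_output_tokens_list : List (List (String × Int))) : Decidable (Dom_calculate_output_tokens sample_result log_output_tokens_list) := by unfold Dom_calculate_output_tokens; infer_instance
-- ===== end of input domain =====

-- B builds the formatted per-log entries first and derives the two overall sums from those entries
-- by key suffix (alternative decomposition, same return value; like A, the Python B mutates
-- sample_result in place — the equivalence proved here is about the return value).
-- ===== PORT A =====
-- A mutates sample_result['output_tokens'] in place inside the loop; ported as Dict.modify at key
-- "output_tokens" (the key is always present, so the default [] is never read — same as Python's d[k][k2]=v).
def calculate_output_tokens (sample_result : List (String × List (String × Int))) (log_output_tokens_list : List (List (String × Int))) : List (String × List (String × Int)) :=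
  let num_logs : Int := (log_output_tokens_list.length : Int)
  let init_output_tokens : List Int := log_output_tokens_list.map (fun log => (PySem.Dict.mk log).getD "init_output_tokens" 0)
  let total_output_tokens : List Int := log_output_tokens_list.map (fun log => (PySem.Dict.mk log).getD "total_output_tokens" 0)
  let overall_output_tokens_fusion := init_output_tokens.sum
  let overall_output_tokens_uq_fusion := total_output_tokens.sum
  let sr1 := (PySem.Dict.mk sample_result).insert "output_tokens"
      [("overall_output_tokens_fusion", overall_output_tokens_fusion), ("overall_output_tokens_uq_fusion", overall_output_tokens_uq_fusion)]
  -- list indices i are in range, so pyGetD's default 0 is never read (= Python's init_output_tokens[i])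
  let sr2 := (PySem.List.pyRange 0 num_logs).foldl (fun s i =>
      PySem.Dict.modify s "output_tokens" [] (fun d =>
        (((PySem.Dict.mk d).insert ("log" ++ PySem.Int.toStr (i+1) ++ "_init_output_tokens") (PySem.List.pyGetD init_output_tokens i 0)).insert
          ("log" ++ PySem.Int.toStr (i+1) ++ "_total_output_tokens") (PySem.List.pyGetD total_output_tokens i 0)).items)) sr1
  sr2.items

-- ===== PORT B =====
def calculate_output_tokens_alt (sample_result : List (String × List (String × Int))) (log_output_tokens_list : List (List (String × Int))) : List (String × List (String × Int)) :=
  let entries := (PySem.List.enumerate log_output_tokens_list 1).flatMap (fun p =>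
    (["init", "total"]).map (fun kind =>
      ("log" ++ PySem.Int.toStr p.1 ++ "_" ++ kind ++ "_output_tokens",
       (PySem.Dict.mk p.2).getD (kind ++ "_output_tokens") 0)))
  let s_init := ((entries.filter (fun e => PySem.Str.endswith e.1 "_init_output_tokens")).map Prod.snd).sum
  let s_total := ((entries.filter (fun e => PySem.Str.endswith e.1 "_total_output_tokens")).map Prod.snd).sum
  let tokens := (PySem.Dict.mk [("overall_output_tokens_fusion", s_init), ("overall_output_tokens_uq_fusion", s_total)]).update entries
  ((PySem.Dict.mk sample_result).insert "output_tokens" tokens.items).items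

-- ===== PRECONDITION & SPEC =====
def Spec_calculate_output_tokens (sample_result : List (String × List (String × Int))) (log_output_tokens_list : List (List (String × Int))) (out : List (String × List (String × Int))) : Prop := out = calculate_output_tokens_alt sample_result log_output_tokens_list
instance (sample_result : List (String × List (String × Int))) (log_output_tokens_list : List (List (String × Int))) (out : List (String × List (String × Int))) : Decidable (Spec_calculate_output_tokens sample_result log_output_tokens_list out) := by unfold Spec_calculate_output_tokens; infer_instance

-- ===== CLAIM (what is proved, stated in full; the proofs are below) =====
def Claim_equal_calculate_output_tokens : Prop := ∀ (sample_result : List (String × List (String × Int))) (log_output_tokens_list : List (List (String × Int))), Dom_calculate_output_tokens sample_result log_output_tokens_list → Spec_calculate_output_tokens sample_result log_output_tokens_list (calculate_output_tokens sample_result log_output_tokens_list)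

-- ===== LEMMAS AND PROOFS =====

-- modify at the key just inserted = insert the modified value
theorem pv_modify_insert {ν : Type} (d : PySem.Dict String ν) (k : String) (v d0 : ν) (f : ν → ν) :
    PySem.Dict.modify (d.insert k v) k d0 f = d.insert k (f v) := by
  simp [PySem.Dict.modify, PySem.Dict.getD_insert_self, PySem.Dict.insert_insert_self]

-- A's outer loop of modifies at "output_tokens" collapses to one insert of the folded inner dict
theorem pv_loopA {α : Type} (l : List α) (d : PySem.Dict String (List (String × Int))) (k : String)
    (g : List (String × Int) → α → PySem.Dict String Int) (v0 : List (String × Int)) :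
    l.foldl (fun s i => PySem.Dict.modify s k [] (fun x => (g x i).items)) (d.insert k v0)
      = d.insert k ((l.foldl (fun t i => g t.items i) (PySem.Dict.mk v0)).items) := by
  induction l generalizing v0 with
  | nil => simp
  | cons i t ih => simp only [List.foldl_cons, pv_modify_insert, ih]

-- enumerate starting at 1 as an indexed map over List.range
theorem pv_enumerate_one {α : Type} [Inhabited α] (xs : List α) :
    PySem.List.enumerate xs 1 = (List.range xs.length).map (fun (j : Nat) => ((j : Int) + 1, xs.getD j default)) := by
  have h : ∀ (t : List α) (s : Int),
      PySem.List.enumerate t s = (List.range t.length).map (fun (j : Nat) => (s + (j : Nat), t.getD j default)) := by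
    intro t
    induction t with
    | nil => intro s; simp [PySem.List.enumerate]
    | cons x r ih =>
      intro s
      simp only [PySem.List.enumerate, List.length_cons, List.range_succ_eq_map, List.map_cons, List.map_map]
      refine List.cons_eq_cons.mpr ⟨by simp, ?_⟩
      rw [ih (s + 1)]
      apply List.map_congr_left
      intro j _
      simp only [Function.comp_apply, List.getD_cons_succ, Nat.succ_eq_add_one, Prod.mk.injEq]
      constructor
      · push_cast; ring
      · trivial
  rw [h]
  apply List.map_congr_left
  intro j _
  simp only [Prod.mk.injEq]
  exact ⟨by omega, trivial⟩

-- the four endswith facts for the generated keys (s is the unknown log-number string)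
theorem pv_ends_ii (s : String) :
    PySem.Str.endswith ("log" ++ s ++ "_init_output_tokens") "_init_output_tokens" = true := by
  simp only [PySem.Str.endswith_eq, String.toList_append]
  rw [PySem.Chars.endswith_iff]
  exact List.suffix_append _ _
theorem pv_ends_tt (s : String) :
    PySem.Str.endswith ("log" ++ s ++ "_total_output_tokens") "_total_output_tokens" = true := by
  simp only [PySem.Str.endswith_eq, String.toList_append]
  rw [PySem.Chars.endswith_iff]
  exact List.suffix_append _ _
theorem pv_ends_ti (s : String) :
    PySem.Str.endswith ("log" ++ s ++ "_total_output_tokens") "_init_output_tokens" = false := by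
  simp only [PySem.Str.endswith_eq, String.toList_append]
  rw [Bool.eq_false_iff, Ne, PySem.Chars.endswith_iff]
  intro h
  have h2 : ("_init_output_tokens".toList) <:+ ("_total_output_tokens".toList) :=
    List.suffix_of_suffix_length_le h (List.suffix_append _ _) (by decide)
  revert h2; decide
theorem pv_ends_it (s : String) :
    PySem.Str.endswith ("log" ++ s ++ "_init_output_tokens") "_total_output_tokens" = false := by
  simp only [PySem.Str.endswith_eq, String.toList_append]
  rw [Bool.eq_false_iff, Ne, PySem.Chars.endswith_iff]
  intro h
  have h2 : ("_init_output_tokens".toList) <:+ ("_total_output_tokens".toList) :=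
    List.suffix_of_suffix_length_le (List.suffix_append _ _) h (by decide)
  revert h2; decide

-- filtering two-entry blocks where the predicate keeps exactly the first / second entry
theorem pv_filter_blocks_fst {α β : Type} (l : List α) (f g : α → β) (p : β → Bool)
    (hf : ∀ a, p (f a) = true) (hg : ∀ a, p (g a) = false) :
    (l.flatMap (fun a => [f a, g a])).filter p = l.map f := by
  induction l with
  | nil => rfl
  | cons x t ih => simp [List.flatMap_cons, hf, hg, ih]
theorem pv_filter_blocks_snd {α β : Type} (l : List α) (f g : α → β) (p : β → Bool)
    (hf : ∀ a, p (f a) = false) (hg : ∀ a, p (g a) = true) :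
    (l.flatMap (fun a => [f a, g a])).filter p = l.map g := by
  induction l with
  | nil => rfl
  | cons x t ih => simp [List.flatMap_cons, hf, hg, ih]

-- reading every index of xs through getD is just mapping over xs
theorem pv_map_getD_range (xs : List (List (String × Int))) (k : String) :
    (List.range xs.length).map (fun j => (PySem.Dict.mk (xs.getD j default)).getD k 0)
      = xs.map (fun log => (PySem.Dict.mk log).getD k 0) := by
  apply List.ext_getElem
  · simp
  · intro i h1 h2
    have hx : i < xs.length := by simpa using h2
    simp [List.getD, List.getElem?_eq_getElem hx]

-- A's indexed lookup in the precomputed list = reading the log directly ((Dict.mk []).getD k 0 = 0)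
theorem pv_getD_map (xs : List (List (String × Int))) (k : String) (j : Nat) :
    (xs.map (fun log => (PySem.Dict.mk log).getD k 0)).getD j 0
      = (PySem.Dict.mk (xs.getD j default)).getD k 0 := by
  simp only [List.getD, List.getElem?_map]
  cases xs[j]? with
  | none => simp only [Option.map_none, Option.getD_none]; rfl
  | some v => simp only [Option.map_some, Option.getD_some]

-- normalise B's piecewise-built key strings to A's literal-suffix form
theorem pv_key_init (s : String) : s ++ "_" ++ "init" ++ "_output_tokens" = s ++ "_init_output_tokens" := by
  rw [String.append_assoc, String.append_assoc]
  have h : ("_" ++ ("init" ++ "_output_tokens") : String) = "_init_output_tokens" := rfl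
  rw [h]
theorem pv_key_total (s : String) : s ++ "_" ++ "total" ++ "_output_tokens" = s ++ "_total_output_tokens" := by
  rw [String.append_assoc, String.append_assoc]
  have h : ("_" ++ ("total" ++ "_output_tokens") : String) = "_total_output_tokens" := rfl
  rw [h]

theorem calculate_output_tokens_spec : Claim_equal_calculate_output_tokens := by
  intro sr xs _
  unfold Spec_calculate_output_tokens calculate_output_tokens calculate_output_tokens_alt
  -- put B's entries list into flatMap-over-range form with normalised keys
  simp only [pv_enumerate_one, List.flatMap_map, List.map_cons, List.map_nil, pv_key_init, pv_key_total]
  have hkey : ("init" ++ "_output_tokens" : String) = "init_output_tokens" := rfl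
  have hkey2 : ("total" ++ "_output_tokens" : String) = "total_output_tokens" := rfl
  simp only [hkey, hkey2]
  -- the two filtered sums are exactly the per-field value lists
  have hf := pv_filter_blocks_fst (List.range xs.length)
      (fun a : Nat => (("log" ++ PySem.Int.toStr ((a : Int) + 1) ++ "_init_output_tokens",
        (PySem.Dict.mk (xs.getD a default)).getD "init_output_tokens" 0) : String × Int))
      (fun a : Nat => ("log" ++ PySem.Int.toStr ((a : Int) + 1) ++ "_total_output_tokens",
        (PySem.Dict.mk (xs.getD a default)).getD "total_output_tokens" 0))
      (fun e => PySem.Str.endswith e.1 "_init_output_tokens")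
      (fun a => pv_ends_ii _) (fun a => pv_ends_ti _)
  have hg := pv_filter_blocks_snd (List.range xs.length)
      (fun a : Nat => (("log" ++ PySem.Int.toStr ((a : Int) + 1) ++ "_init_output_tokens",
        (PySem.Dict.mk (xs.getD a default)).getD "init_output_tokens" 0) : String × Int))
      (fun a : Nat => ("log" ++ PySem.Int.toStr ((a : Int) + 1) ++ "_total_output_tokens",
        (PySem.Dict.mk (xs.getD a default)).getD "total_output_tokens" 0))
      (fun e => PySem.Str.endswith e.1 "_total_output_tokens")
      (fun a => pv_ends_it _) (fun a => pv_ends_tt _)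
  rw [hf, hg]
  simp only [List.map_map, Function.comp_def]
  rw [pv_map_getD_range, pv_map_getD_range]
  -- collapse A's modify loop and align both folds of inserts
  simp only [PySem.List.pyRange_zero_natCast, List.foldl_map, PySem.Dict.update,
    List.foldl_flatMap, List.foldl_cons, List.foldl_nil, PySem.List.pyGetD_natCast, pv_getD_map]
  have hA := pv_loopA (List.range xs.length) (PySem.Dict.mk sr) "output_tokens"
      (fun d y => ((PySem.Dict.mk d).insert ("log" ++ PySem.Int.toStr ((y : Int) + 1) ++ "_init_output_tokens")
          ((PySem.Dict.mk (xs.getD y default)).getD "init_output_tokens" 0)).insert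
        ("log" ++ PySem.Int.toStr ((y : Int) + 1) ++ "_total_output_tokens")
          ((PySem.Dict.mk (xs.getD y default)).getD "total_output_tokens" 0))
      [("overall_output_tokens_fusion", (xs.map (fun log => (PySem.Dict.mk log).getD "init_output_tokens" 0)).sum),
       ("overall_output_tokens_uq_fusion", (xs.map (fun log => (PySem.Dict.mk log).getD "total_output_tokens" 0)).sum)]
  rw [hA]
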